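-- pv_equiv track=rewrite | github.com/mcmathews/DailyProgrammer | GolombRulers/GolombRulers.py | widthsToMeasurableDistances
-- ===== SOURCE A (Python) =====
-- def widthsToMeasurableDistances(widths):
-- 	measurableDistances = {}
-- 	for i, w in enumerate(widths):
-- 		measurableDistances[w] = measurableDistances[w] + 1 if w in measurableDistances else 1
-- 		sumWidth = w
-- 		for j, wi in enumerate(widths[i+1:]):
-- 			sumWidth += wi
-- 			measurableDistances[sumWidth] = measurableDistances[sumWidth] + 1 if sumWidth in measurableDistances else 1
--
-- 	return measurableDistances
-- ===== SOURCE B (Python) =====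
-- def widthsToMeasurableDistances(widths):
--     n = len(widths)
--     prefix = [0]
--     for w in widths:
--         prefix.append(prefix[-1] + w)
--     counts = {}
--     for i in range(n):
--         for j in range(i + 1, n + 1):
--             s = prefix[j] - prefix[i]
--             counts[s] = counts.get(s, 0) + 1
--     return counts
-- ===== Notes on version B (the rewrite author's own statement) =====
-- stated objective: alternative
-- what changed: Replaces A's running inner-loop sum over list slices by a prefix-sum table built once and indexed over integer pairs (i,j), counting P[j]-P[i] with dict.get.
import Mathlib
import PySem

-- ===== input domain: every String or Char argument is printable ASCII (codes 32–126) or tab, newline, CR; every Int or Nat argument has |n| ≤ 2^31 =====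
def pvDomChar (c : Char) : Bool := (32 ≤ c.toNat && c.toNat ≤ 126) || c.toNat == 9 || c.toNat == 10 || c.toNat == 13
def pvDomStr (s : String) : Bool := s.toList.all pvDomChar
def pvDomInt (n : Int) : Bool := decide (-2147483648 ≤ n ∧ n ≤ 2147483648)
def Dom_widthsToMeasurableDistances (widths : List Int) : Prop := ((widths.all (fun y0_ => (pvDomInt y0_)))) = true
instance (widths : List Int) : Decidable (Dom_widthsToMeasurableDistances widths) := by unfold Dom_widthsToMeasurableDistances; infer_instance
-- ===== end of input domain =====

-- B replaces A's running inner-loop sum over list slices by a pref-sum table indexed over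
-- integer range pairs (objective: alternative decomposition, same O(n^2) cost).

-- ===== PORT A =====
def widthsToMeasurableDistances (widths : List Int) : List (Int × Int) :=
  let md :=
    (PySem.List.enumerate widths).foldl
      (fun md (p : Int × Int) =>
        let i := p.1; let w := p.2
        let md := md.insert w (if md.contains w then md.getD w 0 + 1 else 1)
        let st :=
          (PySem.List.enumerate (PySem.List.slice widths (some (i + 1)) none)).foldl
            (fun (st : Int × PySem.Dict Int Int) (q : Int × Int) =>
              let sumWidth := st.1 + q.2
              (sumWidth,
               st.2.insert sumWidth (if st.2.contains sumWidth then st.2.getD sumWidth 0 + 1 else 1)))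
            (w, md)
        st.2)
      PySem.Dict.empty
  md.items

-- ===== PORT B =====
def widthsToMeasurableDistances_alt (widths : List Int) : List (Int × Int) :=
  let n : Int := widths.length
  let pref : List Int := widths.foldl (fun p w => p ++ [PySem.List.pyGetD p (-1) 0 + w]) [0]
  let counts :=
    (PySem.List.pyRange 0 n 1).foldl
      (fun c i =>
        (PySem.List.pyRange (i + 1) (n + 1) 1).foldl
          (fun c j =>
            let s := PySem.List.pyGetD pref j 0 - PySem.List.pyGetD pref i 0
            c.insert s (c.getD s 0 + 1))
          c)
      PySem.Dict.empty
  counts.items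

-- ===== PRECONDITION & SPEC =====
def Spec_widthsToMeasurableDistances (widths : List Int) (out : List (Int × Int)) : Prop := out = widthsToMeasurableDistances_alt widths
instance (widths : List Int) (out : List (Int × Int)) : Decidable (Spec_widthsToMeasurableDistances widths out) := by unfold Spec_widthsToMeasurableDistances; infer_instance

-- ===== CLAIM (what is proved, stated in full; the proofs are below) =====
def Claim_equal_widthsToMeasurableDistances : Prop := ∀ (widths : List Int), Dom_widthsToMeasurableDistances widths → Spec_widthsToMeasurableDistances widths (widthsToMeasurableDistances widths)

-- ===== LEMMAS AND PROOFS =====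

-- the single increment step both programs perform on the dict
def pvIncr (d : PySem.Dict Int Int) (k : Int) : PySem.Dict Int Int :=
  d.insert k (d.getD k 0 + 1)

-- the sequence of keys contributed by one row: s+x1, s+x1+x2, …
def pvRow (s : Int) : List Int → List Int
  | [] => []
  | x :: xs => (s + x) :: pvRow (s + x) xs

-- all keys, outer row by outer row
def pvKeys : List Int → List Int
  | [] => []
  | w :: ws => (w :: pvRow w ws) ++ pvKeys ws

theorem pvIncr_eq (d : PySem.Dict Int Int) (k : Int) :
    d.insert k (if d.contains k then d.getD k 0 + 1 else 1) = pvIncr d k := by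
  unfold pvIncr
  by_cases h : d.contains k = true
  · simp [h]
  · rw [if_neg h, show d.getD k 0 = 0 from PySem.Dict.getD_of_not_contains _ _ (by simpa using h)]
    norm_num

-- pvRow s l is the list of running partial sums s+x1, s+x1+x2, …
theorem pvRow_zero_cons (w : Int) (l : List Int) : pvRow 0 (w :: l) = w :: pvRow w l := by
  simp [pvRow]

-- ===== A side =====
theorem A_inner (l : List Int) : ∀ (start s : Int) (d : PySem.Dict Int Int),
    (PySem.List.enumerate l start).foldl
      (fun (st : Int × PySem.Dict Int Int) (q : Int × Int) =>
        (st.1 + q.2,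
         st.2.insert (st.1 + q.2)
           (if st.2.contains (st.1 + q.2) then st.2.getD (st.1 + q.2) 0 + 1 else 1)))
      (s, d)
    = (s + l.sum, (pvRow s l).foldl pvIncr d) := by
  induction l with
  | nil => intro start s d; simp [PySem.List.enumerate, pvRow]
  | cons x xs ih =>
    intro start s d
    rw [PySem.List.enumerate_cons]
    simp only [List.foldl_cons]
    rw [ih (start + 1) (s + x) (d.insert (s + x) (if d.contains (s + x) then d.getD (s + x) 0 + 1 else 1))]
    rw [pvIncr_eq]
    simp [pvRow, add_assoc]

theorem A_outer (xs : List Int) : ∀ (ws : List Int) (k : Nat), xs.drop k = ws →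
    ∀ (d : PySem.Dict Int Int),
    (PySem.List.enumerate ws (k : Int)).foldl
      (fun md (p : Int × Int) =>
        ((PySem.List.enumerate (PySem.List.slice xs (some (p.1 + 1)) none)).foldl
            (fun (st : Int × PySem.Dict Int Int) (q : Int × Int) =>
              (st.1 + q.2,
               st.2.insert (st.1 + q.2)
                 (if st.2.contains (st.1 + q.2) then st.2.getD (st.1 + q.2) 0 + 1 else 1)))
            (p.2, md.insert p.2 (if md.contains p.2 then md.getD p.2 0 + 1 else 1))).2)
      d
    = (pvKeys ws).foldl pvIncr d := by
  intro ws
  induction ws with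
  | nil => intro k h d; simp [PySem.List.enumerate, pvKeys]
  | cons w ws ih =>
    intro k h d
    have hdrop : xs.drop (k + 1) = ws := by
      have : (xs.drop k).drop 1 = ws := by rw [h]; simp
      simpa [List.drop_drop, Nat.add_comm] using this
    rw [PySem.List.enumerate_cons]
    simp only [List.foldl_cons]
    have hcast : ((k : Int) + 1) = ((k + 1 : Nat) : Int) := by push_cast; ring
    rw [hcast, PySem.List.slice_from_natCast, hdrop]
    rw [A_inner ws 0 w (d.insert w (if d.contains w then d.getD w 0 + 1 else 1))]
    rw [pvIncr_eq]
    rw [ih (k + 1) hdrop]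
    simp [pvKeys, List.foldl_append]

-- ===== B side =====
-- the prefix-list building loop produces s :: partial sums
theorem B_build (xs : List Int) : ∀ (acc : List Int) (s : Int),
    xs.foldl (fun p w => p ++ [PySem.List.pyGetD p (-1) 0 + w]) (acc ++ [s])
    = acc ++ s :: pvRow s xs := by
  induction xs with
  | nil => intro acc s; simp [pvRow]
  | cons w ws ih =>
    intro acc s
    simp only [List.foldl_cons, PySem.List.pyGetD_neg_one_append_singleton]
    have := ih (acc ++ [s]) (s + w)
    simpa [pvRow] using this

theorem prefix_get (xs : List Int) : ∀ (s : Int) (k : Nat), k ≤ xs.length →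
    (s :: pvRow s xs).getD k 0 = s + (xs.take k).sum := by
  induction xs with
  | nil =>
    intro s k hk
    have hk0 : k = 0 := by simpa using hk
    subst hk0; simp [pvRow]
  | cons x xs ih =>
    intro s k hk
    cases k with
    | zero => simp
    | succ m =>
      have : (s :: pvRow s (x :: xs)).getD (m + 1) 0 = ((s + x) :: pvRow (s + x) xs).getD m 0 := by
        simp [pvRow]
      rw [this, ih (s + x) m (by simpa using hk)]
      simp [add_assoc]

theorem prefix_get' (xs : List Int) (j : Int) (h0 : 0 ≤ j) (hj : j ≤ (xs.length : Int)) :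
    PySem.List.pyGetD (0 :: pvRow 0 xs) j 0 = ((xs.take j.toNat).sum : Int) := by
  have hje : j = ((j.toNat : Nat) : Int) := by omega
  rw [hje, PySem.List.pyGetD_natCast]
  have h := prefix_get xs 0 j.toNat (by omega)
  have hm : max j 0 = j := max_eq_left h0
  simpa [hm] using h

theorem B_row (xs : List Int) : ∀ (m i : Nat) (c : Int), xs.length - i = m → i ≤ xs.length →
    (PySem.List.pyRange ((i : Int) + 1) ((xs.length : Int) + 1) 1).map
      (fun j => ((xs.take j.toNat).sum : Int) - c)
    = pvRow ((xs.take i).sum - c) (xs.drop i) := by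
  intro m
  induction m with
  | zero =>
    intro i c hm hi
    have hieq : i = xs.length := by omega
    subst hieq
    rw [PySem.List.pyRange_one_eq_nil (by omega)]
    simp [pvRow]
  | succ m ih =>
    intro i c hm hi
    have hlt : i < xs.length := by omega
    rw [PySem.List.pyRange_one_cons (by omega)]
    rw [List.map_cons]
    have hdropc : xs.drop i = xs[i] :: xs.drop (i + 1) := List.drop_eq_getElem_cons hlt
    have htake : (xs.take (i + 1)).sum = (xs.take i).sum + xs[i] := by
      exact List.sum_take_succ xs i hlt
    have hcast : ((i : Int) + 1) = ((i + 1 : Nat) : Int) := by push_cast; ring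
    have hhead : ((xs.take ((i : Int) + 1).toNat).sum : Int) - c = (xs.take i).sum - c + xs[i] := by
      rw [show ((i : Int) + 1).toNat = i + 1 by omega, htake]; ring
    rw [hhead, hdropc]
    rw [show pvRow ((xs.take i).sum - c) (xs[i] :: xs.drop (i + 1))
        = ((xs.take i).sum - c + xs[i]) :: pvRow ((xs.take i).sum - c + xs[i]) (xs.drop (i + 1)) from rfl]
    congr 1
    have := ih (i + 1) c (by omega) (by omega)
    rw [hcast]
    rw [show (xs.take i).sum - c + xs[i] = (xs.take (i + 1)).sum - c by rw [htake]; ring]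
    exact this

theorem foldl_incr_map (l : List Int) (f : Int → Int) (c : PySem.Dict Int Int) :
    l.foldl (fun c j => pvIncr c (f j)) c = (l.map f).foldl pvIncr c := by
  induction l generalizing c with
  | nil => rfl
  | cons x xs ih => simp only [List.foldl_cons, List.map_cons]; exact ih _

theorem B_inner (xs : List Int) (i : Nat) (hi : i < xs.length) (c : PySem.Dict Int Int) :
    (PySem.List.pyRange ((i : Int) + 1) ((xs.length : Int) + 1) 1).foldl
      (fun c j =>
        c.insert (PySem.List.pyGetD (0 :: pvRow 0 xs) j 0 - PySem.List.pyGetD (0 :: pvRow 0 xs) (i : Int) 0)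
          (c.getD (PySem.List.pyGetD (0 :: pvRow 0 xs) j 0 - PySem.List.pyGetD (0 :: pvRow 0 xs) (i : Int) 0) 0 + 1))
      c
    = (pvRow 0 (xs.drop i)).foldl pvIncr c := by
  have hbody : (PySem.List.pyRange ((i : Int) + 1) ((xs.length : Int) + 1) 1).foldl
      (fun c j =>
        c.insert (PySem.List.pyGetD (0 :: pvRow 0 xs) j 0 - PySem.List.pyGetD (0 :: pvRow 0 xs) (i : Int) 0)
          (c.getD (PySem.List.pyGetD (0 :: pvRow 0 xs) j 0 - PySem.List.pyGetD (0 :: pvRow 0 xs) (i : Int) 0) 0 + 1))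
      c
    = (PySem.List.pyRange ((i : Int) + 1) ((xs.length : Int) + 1) 1).foldl
      (fun c j => pvIncr c (((xs.take j.toNat).sum : Int) - (xs.take i).sum)) c := by
    apply PySem.List.foldl_congr_mem
    intro acc j hj
    have hb := PySem.List.mem_pyRange_one.mp hj
    rw [prefix_get' xs j (by omega) (by omega),
        prefix_get' xs (i : Int) (by omega) (by omega)]
    rw [show ((i : Int)).toNat = i by omega]
    rfl
  rw [hbody, foldl_incr_map]
  rw [B_row xs (xs.length - i) i ((xs.take i).sum) rfl (by omega)]
  rw [sub_self]

theorem B_outer (xs : List Int) : ∀ (m i : Nat), xs.length - i = m → i ≤ xs.length →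
    ∀ (d : PySem.Dict Int Int),
    (PySem.List.pyRange (i : Int) ((xs.length : Int)) 1).foldl
      (fun c ii => (pvRow 0 (xs.drop ii.toNat)).foldl pvIncr c) d
    = (pvKeys (xs.drop i)).foldl pvIncr d := by
  intro m
  induction m with
  | zero =>
    intro i hm hi d
    have hieq : i = xs.length := by omega
    subst hieq
    rw [PySem.List.pyRange_one_eq_nil (by omega)]
    simp [pvKeys]
  | succ m ih =>
    intro i hm hi d
    have hlt : i < xs.length := by omega
    rw [PySem.List.pyRange_one_cons (by omega)]
    rw [List.foldl_cons]
    have hdropc : xs.drop i = xs[i] :: xs.drop (i + 1) := List.drop_eq_getElem_cons hlt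
    rw [show ((i : Int)).toNat = i by omega]
    have hcast : ((i : Int) + 1) = ((i + 1 : Nat) : Int) := by push_cast; ring
    rw [hcast, ih (i + 1) (by omega) (by omega)]
    rw [hdropc]
    rw [show pvKeys (xs[i] :: xs.drop (i + 1))
        = (xs[i] :: pvRow xs[i] (xs.drop (i + 1))) ++ pvKeys (xs.drop (i + 1)) from rfl]
    rw [List.foldl_append, ← pvRow_zero_cons, ← hdropc]

theorem A_char (xs : List Int) :
    widthsToMeasurableDistances xs = ((pvKeys xs).foldl pvIncr PySem.Dict.empty).items := by
  unfold widthsToMeasurableDistances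
  have h := A_outer xs xs 0 (by simp) PySem.Dict.empty
  simp only [Int.natCast_zero] at h
  simp only [h]

theorem B_char (xs : List Int) :
    widthsToMeasurableDistances_alt xs = ((pvKeys xs).foldl pvIncr PySem.Dict.empty).items := by
  unfold widthsToMeasurableDistances_alt
  simp only []
  rw [show ([0] : List Int) = [] ++ [0] from rfl, B_build xs [] 0, List.nil_append]
  have hcongr : (PySem.List.pyRange 0 ((xs.length : Int)) 1).foldl
      (fun c i =>
        (PySem.List.pyRange (i + 1) ((xs.length : Int) + 1) 1).foldl
          (fun c j =>
            c.insert (PySem.List.pyGetD (0 :: pvRow 0 xs) j 0 - PySem.List.pyGetD (0 :: pvRow 0 xs) i 0)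
              (c.getD (PySem.List.pyGetD (0 :: pvRow 0 xs) j 0 - PySem.List.pyGetD (0 :: pvRow 0 xs) i 0) 0 + 1))
          c)
      PySem.Dict.empty
      = (PySem.List.pyRange 0 ((xs.length : Int)) 1).foldl
        (fun c ii => (pvRow 0 (xs.drop ii.toNat)).foldl pvIncr c) PySem.Dict.empty := by
    apply PySem.List.foldl_congr_mem
    intro acc i hi
    have hb := PySem.List.mem_pyRange_one.mp hi
    have hieq : i = ((i.toNat : Nat) : Int) := by omega
    rw [hieq]
    exact B_inner xs i.toNat (by omega) acc
  rw [hcongr]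
  have hout := B_outer xs xs.length 0 (by omega) (by omega) PySem.Dict.empty
  simp only [Nat.cast_zero] at hout
  rw [hout]
  simp

-- ===== VERDICT (by name: the statement is the Claim_ definition above) =====
theorem widthsToMeasurableDistances_spec : Claim_equal_widthsToMeasurableDistances := by
  intro xs _
  unfold Spec_widthsToMeasurableDistances
  rw [A_char, B_char]
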